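-- pv_equiv track=rewrite | github.com/marcosviniciusi/unmanic-plugins | source/video_transcoder/lib/tools.py | join_filtergraph
-- ===== SOURCE A (Python) =====
-- def join_filtergraph(filter_id, filter_args, stream_id):
--     """
--     Joins a filtergraph from a collection of args
--     """
--     filtergraph = ''
--     count = 1
--     for filter_string in filter_args:
--         # If we are appending to existing filters, separate by a semicolon to start a new chain
--         if filtergraph:
--             filtergraph += ';'
--         # Add the input for this filter
--         filtergraph += '[{}]'.format(filter_id)
--         # Add filtergraph
--         filtergraph += '{}'.format(filter_string)
--         # Update filter ID and add it to the end
--         filter_id = '0:vf:{}-{}'.format(stream_id, count)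
--         filtergraph += '[{}]'.format(filter_id)
--         # Increment filter ID counter
--         count += 1
--     return filter_id, filtergraph
-- ===== SOURCE B (Python) =====
-- def join_filtergraph(filter_id, filter_args, stream_id):
--     """
--     Joins a filtergraph from a collection of args
--     """
--     n = len(filter_args)
--     final_id = filter_id if n == 0 else '0:vf:{}-{}'.format(stream_id, n)
--     return final_id, _graph_from(filter_id, filter_args, stream_id, 1)
--
--
-- def _graph_from(in_id, filter_args, stream_id, k):
--     # Structural recursion: emit one chain segment, then recurse on the tail;
--     # a ';' separator is added only when the recursively built suffix is nonempty.
--     if not filter_args: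
--         return ''
--     out_id = '0:vf:{}-{}'.format(stream_id, k)
--     segment = '[{}]{}[{}]'.format(in_id, filter_args[0], out_id)
--     rest = _graph_from(out_id, filter_args[1:], stream_id, k + 1)
--     return segment if not rest else segment + ';' + rest
-- ===== Notes on version B (the rewrite author's own statement) =====
-- stated objective: alternative
-- what changed: A threads filter_id, a growing accumulator string and a counter through one imperative loop, prefixing ';' whenever the accumulator is already nonempty; B instead computes the final filter id in O(1) by a closed-form formula from len(filter_args) and builds the graph string by structural recursion on the argument list, appending ';' only when the recursively built suffix is nonempty.
import Mathlib
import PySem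

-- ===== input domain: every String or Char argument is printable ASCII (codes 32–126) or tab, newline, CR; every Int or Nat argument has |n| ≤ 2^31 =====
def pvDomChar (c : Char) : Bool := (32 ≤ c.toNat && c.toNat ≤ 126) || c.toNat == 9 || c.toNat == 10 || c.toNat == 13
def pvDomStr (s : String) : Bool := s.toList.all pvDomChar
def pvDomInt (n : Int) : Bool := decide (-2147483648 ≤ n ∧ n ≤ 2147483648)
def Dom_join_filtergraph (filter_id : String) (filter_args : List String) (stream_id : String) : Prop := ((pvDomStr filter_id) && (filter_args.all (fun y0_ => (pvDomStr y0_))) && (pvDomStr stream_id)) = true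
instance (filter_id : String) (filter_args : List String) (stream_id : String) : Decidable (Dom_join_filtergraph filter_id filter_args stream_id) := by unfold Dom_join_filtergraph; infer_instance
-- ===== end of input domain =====

-- B replaces A's single accumulator loop by a closed-form final id plus structural
-- recursion on the args, joining based on the recursive suffix (objective: alternative).

-- ===== PORT A =====
-- the for-loop of A, over the same state (filter_id, filtergraph, count)
def pvJoinLoop (stream_id : String) (filter_args : List String) (filter_id : String)
    (filtergraph : String) (count : Int) : String × String :=
  match filter_args with
  | [] => (filter_id, filtergraph)
  | filter_string :: rest =>
      let fg1 := if filtergraph ≠ "" then filtergraph ++ ";" else filtergraph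
      let fg2 := fg1 ++ ("[" ++ filter_id ++ "]")
      let fg3 := fg2 ++ filter_string
      let filter_id' := "0:vf:" ++ stream_id ++ "-" ++ PySem.Int.toStr count
      let fg4 := fg3 ++ ("[" ++ filter_id' ++ "]")
      pvJoinLoop stream_id rest filter_id' fg4 (count + 1)

def join_filtergraph (filter_id : String) (filter_args : List String) (stream_id : String) : String × String :=
  pvJoinLoop stream_id filter_args filter_id "" 1

-- ===== PORT B =====
-- _graph_from of Source B: structural recursion on the argument list
def pvGraphFrom (in_id : String) (filter_args : List String) (stream_id : String) (k : Int) : String :=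
  match filter_args with
  | [] => ""
  | f :: rest =>
      let out_id := "0:vf:" ++ stream_id ++ "-" ++ PySem.Int.toStr k
      let segment := "[" ++ in_id ++ "]" ++ f ++ "[" ++ out_id ++ "]"
      let r := pvGraphFrom out_id rest stream_id (k + 1)
      if r = "" then segment else segment ++ ";" ++ r

def join_filtergraph_alt (filter_id : String) (filter_args : List String) (stream_id : String) : String × String :=
  let n : Int := filter_args.length
  let final_id := if n == 0 then filter_id else "0:vf:" ++ stream_id ++ "-" ++ PySem.Int.toStr n
  (final_id, pvGraphFrom filter_id filter_args stream_id 1)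

-- ===== PRECONDITION & SPEC =====
def Spec_join_filtergraph (filter_id : String) (filter_args : List String) (stream_id : String) (out : String × String) : Prop := out = join_filtergraph_alt filter_id filter_args stream_id
instance (filter_id : String) (filter_args : List String) (stream_id : String) (out : String × String) : Decidable (Spec_join_filtergraph filter_id filter_args stream_id out) := by unfold Spec_join_filtergraph; infer_instance

-- ===== CLAIM (what is proved, stated in full; the proofs are below) =====
def Claim_equal_join_filtergraph : Prop := ∀ (filter_id : String) (filter_args : List String) (stream_id : String), Dom_join_filtergraph filter_id filter_args stream_id → Spec_join_filtergraph filter_id filter_args stream_id (join_filtergraph filter_id filter_args stream_id)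

-- ===== LEMMAS AND PROOFS =====

-- the id generated at step c
def pvNid (stream_id : String) (c : Int) : String := "0:vf:" ++ stream_id ++ "-" ++ PySem.Int.toStr c

-- the final filter id after processing args starting at counter c
def pvFin (stream_id : String) : List String → String → Int → String
  | [], fid, _ => fid
  | _ :: rest, _, c => pvFin stream_id rest (pvNid stream_id c) (c + 1)

-- a graph suffix built by pvGraphFrom from a nonempty list is nonempty
theorem pvGraphFrom_ne (in_id : String) (f : String) (rest : List String) (sid : String) (k : Int) :
    pvGraphFrom in_id (f :: rest) sid k ≠ "" := by
  rw [pvGraphFrom]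
  intro h
  split at h <;> (have := congrArg String.toList h; simp at this)

-- pvGraphFrom on a single arg is just one segment
theorem pvGraphFrom_single (in_id f sid : String) (k : Int) :
    pvGraphFrom in_id [f] sid k =
      "[" ++ in_id ++ "]" ++ f ++ "[" ++ pvNid sid k ++ "]" := by
  simp [pvGraphFrom, pvNid]

-- pvGraphFrom on two or more args: the suffix is nonempty, so the ';' branch fires
theorem pvGraphFrom_cons_cons (in_id f g : String) (t : List String) (sid : String) (k : Int) :
    pvGraphFrom in_id (f :: g :: t) sid k =
      ("[" ++ in_id ++ "]" ++ f ++ "[" ++ pvNid sid k ++ "]") ++ ";" ++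
        pvGraphFrom (pvNid sid k) (g :: t) sid (k + 1) := by
  rw [pvGraphFrom, if_neg (pvGraphFrom_ne _ g t sid (k + 1))]
  simp [pvNid]

-- characterisation of A's loop: its second component is the conditional prefix
-- followed by B's recursively built graph, its first component is pvFin
theorem pvJoinLoop_eq (sid : String) :
    ∀ (args : List String) (fid fg : String) (c : Int),
      pvJoinLoop sid args fid fg c =
        (pvFin sid args fid c,
         match args with
         | [] => fg
         | _ => (if fg = "" then "" else fg ++ ";") ++ pvGraphFrom fid args sid c) := by
  intro args
  induction args with
  | nil => intro fid fg c; simp [pvJoinLoop, pvFin]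
  | cons f rest ih =>
      intro fid fg c
      rw [pvJoinLoop, ih]
      simp only [Prod.mk.injEq]
      refine ⟨by simp [pvFin, pvNid], ?_⟩
      have hfg4 : ((if fg ≠ "" then fg ++ ";" else fg) ++ ("[" ++ fid ++ "]") ++ f ++
          ("[" ++ ("0:vf:" ++ sid ++ "-" ++ PySem.Int.toStr c) ++ "]")) ≠ "" := by
        intro hcontra
        have := congrArg String.toList hcontra
        simp at this
      cases rest with
      | nil =>
          rw [pvGraphFrom_single]
          by_cases hfg : fg = ""
          · simp [hfg, pvNid, String.append_assoc]
          · simp [hfg, pvNid, String.append_assoc]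
      | cons g t =>
          rw [pvGraphFrom_cons_cons, if_neg hfg4]
          by_cases hfg : fg = ""
          · simp [hfg, pvNid, String.append_assoc]
          · simp [hfg, pvNid, String.append_assoc]

-- the final id computed through the loop has the closed form pvNid at the last counter
theorem pvFin_closed (sid : String) :
    ∀ (args : List String) (fid : String) (c : Int),
      pvFin sid args fid c =
        if args = [] then fid else pvNid sid (c + (args.length : Int) - 1) := by
  intro args
  induction args with
  | nil => intro fid c; simp [pvFin]
  | cons f rest ih =>
      intro fid c
      rw [pvFin, ih, if_neg (List.cons_ne_nil f rest)]
      cases rest with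
      | nil =>
          rw [if_pos rfl]
          have h1 : c + (([f] : List String).length : Int) - 1 = c := by simp
          rw [h1]
      | cons g t =>
          rw [if_neg (List.cons_ne_nil g t)]
          have h1 : c + 1 + (((g :: t) : List String).length : Int) - 1
              = c + (((f :: g :: t) : List String).length : Int) - 1 := by
            simp only [List.length_cons]
            push_cast
            ring
          rw [h1]

-- ===== VERDICT (by name: the statement is the Claim_ definition above) =====
theorem join_filtergraph_spec : Claim_equal_join_filtergraph := by
  intro fid args sid _
  unfold Spec_join_filtergraph join_filtergraph join_filtergraph_alt
  dsimp only
  rw [pvJoinLoop_eq, pvFin_closed]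
  cases args with
  | nil => simp [pvGraphFrom]
  | cons f rest =>
      simp only [Prod.mk.injEq, List.cons_ne_nil, if_neg, not_false_eq_true]
      constructor
      · have h0 : ¬ ((((f :: rest).length : Int)) == 0) = true := by
          simp
          omega
        rw [if_neg h0]
        have h1 : (1 : Int) + (((f :: rest) : List String).length : Int) - 1
            = (((f :: rest) : List String).length : Int) := by ring
        simp only [pvNid]
        rw [h1]
      · simp
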